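-- pv_equiv track=rewrite | github.com/mortemn/COMP34111-AI-Games-Hex | agents/Group25/TransposeMCTS.py | precompute_rotation
-- ===== SOURCE A (Python) =====
-- def precompute_rotation(size: int):
--     # For each bit index, precompute a 180-degree rotated index
--     res = [0] * (size * size)
--     for i in range(size * size):
--         x = i // size
--         y = i % size
--         rx = size - 1 - x
--         ry = size - 1 - y
--         ridx = rx * size + ry
--         res[i] = ridx
--     return res
-- ===== SOURCE B (Python) =====
-- def precompute_rotation(size: int):
--     # 180-degree rotation of bit index i is size*size - 1 - i, in closed form:
--     # (size-1-i//size)*size + (size-1-i%size) == size*size - 1 - i.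
--     return list(range(size * size - 1, -1, -1))
-- ===== Notes on version B (the rewrite author's own statement) =====
-- stated objective: simpler
-- what changed: Replaces the per-index x/y decomposition (i//size, i%size) and re-composition with the algebraic closed form size*size-1-i, returned directly as list(range(size*size-1,-1,-1)) with no loop body, division or preallocated buffer.
import Mathlib
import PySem

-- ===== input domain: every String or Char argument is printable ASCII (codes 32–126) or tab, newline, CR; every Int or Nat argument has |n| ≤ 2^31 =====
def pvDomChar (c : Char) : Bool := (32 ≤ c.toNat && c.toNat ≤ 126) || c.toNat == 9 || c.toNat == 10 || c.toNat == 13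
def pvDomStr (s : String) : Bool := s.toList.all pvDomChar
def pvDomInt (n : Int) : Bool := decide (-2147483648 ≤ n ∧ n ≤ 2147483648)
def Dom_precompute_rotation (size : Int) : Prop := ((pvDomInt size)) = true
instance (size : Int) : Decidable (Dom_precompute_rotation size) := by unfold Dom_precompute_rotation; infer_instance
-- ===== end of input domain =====

-- B replaces the i//size, i%size decomposition by the closed form size*size-1-i
-- (a plain descending range); same values, simpler construction.

-- ===== PORT A =====
def precompute_rotation (size : Int) : List Int :=
  let res : List Int := List.replicate (size * size).toNat 0
  (PySem.List.pyRange 0 (size * size) 1).foldl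
    (fun res i =>
      let x := PySem.Int.floordiv i size
      let y := PySem.Int.mod i size
      let rx := size - 1 - x
      let ry := size - 1 - y
      let ridx := rx * size + ry
      PySem.List.pySetD res i ridx)
    res

-- ===== PORT B =====
def precompute_rotation_alt (size : Int) : List Int :=
  PySem.List.pyRange (size * size - 1) (-1) (-1)

-- ===== PRECONDITION & SPEC =====
def Spec_precompute_rotation (size : Int) (out : List Int) : Prop := out = precompute_rotation_alt size
instance (size : Int) (out : List Int) : Decidable (Spec_precompute_rotation size out) := by unfold Spec_precompute_rotation; infer_instance

-- ===== CLAIM (what is proved, stated in full; the proofs are below) =====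
def Claim_equal_precompute_rotation : Prop := ∀ (size : Int), Dom_precompute_rotation size → Spec_precompute_rotation size (precompute_rotation size)

-- ===== LEMMAS AND PROOFS =====

-- Filling positions 0..m-1 of a buffer with g i yields the mapped range followed by the untouched tail.
lemma foldl_pySetD_range (g : Int → Int) :
    ∀ (m : Nat) (res : List Int), m ≤ res.length →
      (PySem.List.pyRange 0 (m : Int) 1).foldl (fun r i => PySem.List.pySetD r i (g i)) res
        = (List.range m).map (fun (k : Nat) => g (k : Int)) ++ res.drop m := by
  intro m
  induction m with
  | zero => intro res _; simp [PySem.List.pyRange_one_eq_nil]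
  | succ m ih =>
    intro res hlen
    have hsplit : PySem.List.pyRange 0 ((m + 1 : Nat) : Int) 1
        = PySem.List.pyRange 0 (m : Int) 1 ++ [(m : Int)] := by
      have := PySem.List.pyRange_one_succ_right (a := 0) (b := (m : Int)) (by exact_mod_cast Nat.zero_le m)
      simpa [Nat.cast_add, Nat.cast_one] using this
    rw [hsplit, List.foldl_append, ih res (Nat.le_of_succ_le hlen)]
    simp only [List.foldl_cons, List.foldl_nil]
    have hm : m < res.length := hlen
    have htl : m < ((List.range m).map (fun (k : Nat) => g (k : Int)) ++ res.drop m).length := by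
      simp; omega
    rw [PySem.List.pySetD_natCast]
    have hdrop : res.drop m = res[m] :: res.drop (m + 1) :=
      (List.drop_eq_getElem_cons hm)
    rw [hdrop]
    rw [List.range_succ, List.map_append]
    have : ((List.range m).map (fun (k : Nat) => g (k : Int)) ++ res[m] :: res.drop (m + 1)).set m (g (m : Int))
        = (List.range m).map (fun (k : Nat) => g (k : Int)) ++ (res[m] :: res.drop (m + 1)).set 0 (g (m : Int)) := by
      rw [List.set_append_right _ _ (by simp)]
      simp
    rw [this]
    simp only [List.set_cons_zero, List.map_cons, List.map_nil, List.append_assoc,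
      List.cons_append, List.nil_append]

-- The loop body of A computes the closed form size*size - 1 - i, for every size (incl. 0) and every i.
lemma body_closed_form (size i : Int) :
    (size - 1 - PySem.Int.floordiv i size) * size + (size - 1 - PySem.Int.mod i size)
      = size * size - 1 - i := by
  have h := PySem.Int.floordiv_mul_add_mod i size
  nlinarith [h]

-- B's descending range, in mapped-range form.
lemma alt_eq_map (size : Int) :
    precompute_rotation_alt size
      = (List.range (size * size).toNat).map (fun (k : Nat) => size * size - 1 - (k : Int)) := by
  unfold precompute_rotation_alt
  rw [PySem.List.pyRange_neg_one]
  have : (size * size - 1 - (-1)).toNat = (size * size).toNat := by omega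
  rw [this]

-- ===== VERDICT (by name: the statement is the Claim_ definition above) =====
theorem precompute_rotation_spec : Claim_equal_precompute_rotation := by
  intro size _
  unfold Spec_precompute_rotation precompute_rotation
  have hbody :
      (PySem.List.pyRange 0 (size * size) 1).foldl
        (fun res i =>
          let x := PySem.Int.floordiv i size
          let y := PySem.Int.mod i size
          let rx := size - 1 - x
          let ry := size - 1 - y
          let ridx := rx * size + ry
          PySem.List.pySetD res i ridx)
        (List.replicate (size * size).toNat 0)
      = (PySem.List.pyRange 0 (size * size) 1).foldl
          (fun r i => PySem.List.pySetD r i (size * size - 1 - i))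
          (List.replicate (size * size).toNat 0) := by
    apply PySem.List.foldl_congr_mem
    intro acc x _
    simp only [body_closed_form]
  simp only []
  rw [hbody]
  have hnn : (0:Int) ≤ size * size := mul_self_nonneg size
  have hcast : size * size = (((size * size).toNat : Nat) : Int) := by omega
  have hfold :
      (PySem.List.pyRange 0 (size * size) 1).foldl
          (fun r i => PySem.List.pySetD r i (size * size - 1 - i))
          (List.replicate (size * size).toNat 0)
        = (List.range (size * size).toNat).map (fun (k : Nat) => size * size - 1 - (k : Int))
            ++ (List.replicate (size * size).toNat 0).drop (size * size).toNat := by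
    have E := foldl_pySetD_range (fun i => size * size - 1 - i) ((size * size).toNat)
      (List.replicate (size * size).toNat 0) (by simp)
    rw [← hcast] at E
    exact E
  rw [hfold, alt_eq_map]
  simp
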